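-- pv_equiv track=rewrite | github.com/10639780/proti | results/process_results.py | remove_invalid
-- ===== SOURCE A (Python) =====
-- def remove_invalid(time_list, score_list):
--
--     to_remove = []
--
--     for i in range(len(time_list)):
--
--         if score_list[i] == 0:
--             to_remove.append(i)
--
--     to_remove.reverse()
--
--     for i in to_remove:
--         del time_list[i]
--         del score_list[i]
--
--     return time_list, score_list
-- ===== SOURCE B (Python) =====
-- def remove_invalid(time_list, score_list):
--     # Collect the indices of zero-score pairs once, then rebuild both lists in place.
--     bad = {i for i, (_, s) in enumerate(zip(time_list, score_list)) if s == 0}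
--     time_list[:] = [t for i, t in enumerate(time_list) if i not in bad]
--     score_list[:] = [s for i, s in enumerate(score_list) if i not in bad]
--     return time_list, score_list
-- ===== Notes on version B (the rewrite author's own statement) =====
-- stated objective: simpler
-- what changed: Instead of collecting zero-score indices and deleting them one by one in reverse (each del shifts the tail), B builds the set of bad indices once and rebuilds both lists with single filtering passes assigned back in place; Pre_ excludes only the inputs where the score list is shorter than the time list, on which A raises IndexError.
import Mathlib
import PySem

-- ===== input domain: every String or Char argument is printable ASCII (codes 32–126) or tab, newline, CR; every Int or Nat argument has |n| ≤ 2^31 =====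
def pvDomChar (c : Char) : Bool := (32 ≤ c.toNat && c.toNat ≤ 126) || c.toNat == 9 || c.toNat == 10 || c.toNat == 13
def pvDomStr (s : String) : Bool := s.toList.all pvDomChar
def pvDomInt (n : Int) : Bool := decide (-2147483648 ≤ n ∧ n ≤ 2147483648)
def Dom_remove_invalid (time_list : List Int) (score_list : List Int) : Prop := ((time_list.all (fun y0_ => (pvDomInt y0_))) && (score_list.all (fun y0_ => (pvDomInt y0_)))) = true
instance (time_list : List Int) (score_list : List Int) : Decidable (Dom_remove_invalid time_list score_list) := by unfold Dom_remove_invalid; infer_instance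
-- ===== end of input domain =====

-- B replaces the collect-indices-then-reverse-delete loop of A by a bad-index set built once
-- and single filtering passes rebuilding both lists (both versions mutate the Python lists to
-- the same final contents; the equivalence proved here is about the return value).


-- ===== PORT A =====
-- del xs[i] (on failure Python raises; inside Pre_ the index is always in range, the
-- getD fallback only makes the function total)
def pyDel (xs : List Int) (i : Int) : List Int :=
  ((PySem.List.pop? xs i).map Prod.snd).getD xs

def remove_invalid (time_list : List Int) (score_list : List Int) : List Int × List Int :=
  -- to_remove = []; for i in range(len(time_list)): if score_list[i] == 0: to_remove.append(i)
  let to_remove : List Int :=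
    (PySem.List.pyRange 0 (time_list.length : Int) 1).foldl
      (fun acc i => if PySem.List.pyGetD score_list i 1 = 0 then acc ++ [i] else acc) []
  -- to_remove.reverse(); for i in to_remove: del time_list[i]; del score_list[i]
  to_remove.reverse.foldl (fun p i => (pyDel p.1 i, pyDel p.2 i)) (time_list, score_list)

-- ===== PORT B =====
def remove_invalid_alt (time_list : List Int) (score_list : List Int) : List Int × List Int :=
  -- bad = {i for i, (_, s) in enumerate(zip(time_list, score_list)) if s == 0}
  let bad : PySem.Set Int := PySem.Set.ofList
    (((PySem.List.enumerate (List.zip time_list score_list) 0).filter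
        (fun p => p.2.2 == 0)).map Prod.fst)
  -- time_list[:] = [t for i, t in enumerate(time_list) if i not in bad]
  -- score_list[:] = [s for i, s in enumerate(score_list) if i not in bad]
  (((PySem.List.enumerate time_list 0).filter (fun p => !(PySem.Set.contains bad p.1))).map Prod.snd,
   ((PySem.List.enumerate score_list 0).filter (fun p => !(PySem.Set.contains bad p.1))).map Prod.snd)

-- ===== PRECONDITION & SPEC =====
-- A raises IndexError when score_list is shorter than time_list; exactly those inputs are excluded.
def Pre_remove_invalid (time_list : List Int) (score_list : List Int) : Prop :=
  time_list.length ≤ score_list.length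
instance (time_list : List Int) (score_list : List Int) : Decidable (Pre_remove_invalid time_list score_list) := by unfold Pre_remove_invalid; infer_instance

def pvWitness_remove_invalid : List Int × List Int := ([3, 4, 5], [1, 0, 2])

def Spec_remove_invalid (time_list : List Int) (score_list : List Int) (out : List Int × List Int) : Prop := out = remove_invalid_alt time_list score_list
instance (time_list : List Int) (score_list : List Int) (out : List Int × List Int) : Decidable (Spec_remove_invalid time_list score_list out) := by unfold Spec_remove_invalid; infer_instance

-- ===== CLAIM (what is proved, stated in full; the proofs are below) =====
def Claim_equal_remove_invalid : Prop := ∀ (time_list : List Int) (score_list : List Int), Dom_remove_invalid time_list score_list → Pre_remove_invalid time_list score_list → Spec_remove_invalid time_list score_list (remove_invalid time_list score_list)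

-- ===== LEMMAS AND PROOFS =====

-- the common recursive description of the result (on Pre_, i.e. tl no longer than sl)
def pvSpec : List Int → List Int → List Int × List Int
  | [], sl => ([], sl)
  | _ :: _, [] => ([], [])
  | t :: tl, s :: sl =>
      let r := pvSpec tl sl
      if s = 0 then r else (t :: r.1, s :: r.2)

-- ---------- A-side ----------
-- the zero-score positions among the first n indices
def pvZero (sl : List Int) (k : Nat) : Bool := decide (sl[k]?.getD 1 = 0)
def pvF (sl : List Int) (n : Nat) : List Nat := (List.range n).filter (pvZero sl)

lemma pyDel_natCast (xs : List Int) (k : Nat) : pyDel xs (k : Int) = xs.eraseIdx k := by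
  by_cases h : k < xs.length
  · rw [pyDel, PySem.List.pop?_natCast xs k h]
    rfl
  · have h1 : xs.eraseIdx k = xs := List.eraseIdx_of_length_le (by omega)
    have h2 : PySem.List.pop? xs (k : Int) = none := by
      simp [PySem.List.pop?, PySem.List.pyIdx?]
      omega
    simp [pyDel, h2, h1]

-- the first loop of A, as a filter over List.range
lemma A_toRemove (sl : List Int) (n : Nat) :
    (PySem.List.pyRange 0 (n : Int) 1).foldl
      (fun acc i => if PySem.List.pyGetD sl i 1 = 0 then acc ++ [i] else acc) []
    = (pvF sl n).map (fun (k : Nat) => (k : Int)) := by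
  induction n with
  | zero => rfl
  | succ n ih =>
      have hcast : ((n + 1 : Nat) : Int) = (n : Int) + 1 := by push_cast; ring
      rw [hcast, PySem.List.pyRange_one_succ_right (Int.natCast_nonneg n),
        List.foldl_append, ih, List.foldl_cons, List.foldl_nil]
      unfold pvF
      rw [List.range_succ, List.filter_append, List.map_append]
      by_cases h : sl[n]?.getD 1 = 0
      · rw [if_pos (by simpa [List.getD] using h)]
        simp [pvZero, h]
      · rw [if_neg (by simpa [List.getD] using h)]
        simp [pvZero, h]

-- the zero positions of (s :: sl) are position 0 (when s = 0) and the shifted positions of sl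
lemma pvF_cons (s : Int) (sl : List Int) (n : Nat) :
    pvF (s :: sl) (n + 1) = (if s = 0 then [0] else []) ++ (pvF sl n).map (fun k => k + 1) := by
  unfold pvF
  rw [List.range_succ_eq_map, List.filter_cons, List.filter_map]
  have hp : pvZero (s :: sl) ∘ Nat.succ = pvZero sl := by
    funext k
    simp [pvZero, Function.comp]
  rw [hp]
  by_cases hs : s = 0
  · simp [pvZero, hs]
  · simp [pvZero, hs]

lemma castmap (F : List Nat) :
    (F.map (fun k => k + 1)).map (fun k : Nat => (k : Int)) = F.map (fun (k : Nat) => (k : Int) + 1) := by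
  rw [List.map_map]
  refine List.map_congr_left ?_
  intro k _
  simp [Function.comp]

-- deleting shifted indices leaves the heads alone
lemma fold_shift (K : List Nat) (t : Int) (tl : List Int) (s : Int) (sl : List Int) :
    (K.map (fun (k : Nat) => ((k : Int) + 1))).foldl
        (fun (p : List Int × List Int) i => (pyDel p.1 i, pyDel p.2 i)) (t :: tl, s :: sl)
    = (t :: ((K.map (fun (k : Nat) => (k : Int))).foldl
          (fun (p : List Int × List Int) i => (pyDel p.1 i, pyDel p.2 i)) (tl, sl)).1,
       s :: ((K.map (fun (k : Nat) => (k : Int))).foldl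
          (fun (p : List Int × List Int) i => (pyDel p.1 i, pyDel p.2 i)) (tl, sl)).2) := by
  induction K generalizing t tl s sl with
  | nil => rfl
  | cons k K ih =>
      have h1 : ((k : Int) + 1) = ((k + 1 : Nat) : Int) := by push_cast; ring
      simp only [List.map_cons, List.foldl_cons, h1, pyDel_natCast, List.eraseIdx_cons_succ]
      exact ih t (tl.eraseIdx k) s (sl.eraseIdx k)

lemma A_eq_spec : ∀ (tl sl : List Int), tl.length ≤ sl.length →
    remove_invalid tl sl = pvSpec tl sl := by
  intro tl
  induction tl with
  | nil =>
      intro sl _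
      rfl
  | cons t tl ih =>
      intro sl hlen
      cases sl with
      | nil => simp at hlen
      | cons s sl =>
          -- the recursive fold over the tails, named once
          have hR : ((pvF sl tl.length).reverse.map (fun (k : Nat) => (k : Int))).foldl
              (fun (p : List Int × List Int) i => (pyDel p.1 i, pyDel p.2 i)) (tl, sl)
              = pvSpec tl sl := by
            have h := ih sl (by simpa using hlen)
            simp only [remove_invalid] at h
            rw [A_toRemove] at h
            rw [List.map_reverse]
            exact h
          simp only [remove_invalid, List.length_cons]
          rw [A_toRemove (s :: sl) (tl.length + 1), pvF_cons, List.map_append, castmap,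
            List.reverse_append, ← List.map_reverse, List.foldl_append, fold_shift]
          by_cases hs : s = 0
          · rw [if_pos hs]
            simp only [List.map_cons, List.map_nil, List.reverse_singleton,
              List.foldl_cons, List.foldl_nil]
            rw [pyDel_natCast, pyDel_natCast]
            simp only [List.eraseIdx_cons_zero, hR]
            simp [pvSpec, hs]
          · rw [if_neg hs]
            simp only [List.map_nil, List.reverse_nil, List.foldl_nil, hR]
            simp [pvSpec, hs]

-- ---------- B-side ----------
-- the list of bad indices B builds (before deduplication into a set)
def pvBad (tl sl : List Int) : List Int :=
  ((PySem.List.enumerate (List.zip tl sl) 0).filter (fun p => p.2.2 == 0)).map Prod.fst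

-- one filtering pass of B: keep the entries whose index is not bad
def pvKeep (Q : Int → Bool) (s : Int) (xs : List Int) : List Int :=
  ((PySem.List.enumerate xs s).filter (fun p => ! Q p.1)).map Prod.snd

lemma enumerate_shift {α : Type} (xs : List α) (s : Int) :
    PySem.List.enumerate xs (s + 1) = (PySem.List.enumerate xs s).map (fun p => (p.1 + 1, p.2)) := by
  induction xs generalizing s with
  | nil => simp [PySem.List.enumerate_nil]
  | cons x xs ih =>
      rw [PySem.List.enumerate_cons, PySem.List.enumerate_cons, List.map_cons, ih (s + 1)]

lemma pvBad_nil (sl : List Int) : pvBad [] sl = [] := by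
  simp [pvBad, PySem.List.enumerate_nil]

lemma pvBad_cons (t sc : Int) (tl sl : List Int) :
    pvBad (t :: tl) (sc :: sl)
      = (if sc = 0 then [(0 : Int)] else []) ++ (pvBad tl sl).map (fun i => i + 1) := by
  unfold pvBad
  rw [List.zip_cons_cons, PySem.List.enumerate_cons, List.filter_cons,
    show (0 : Int) + 1 = 0 + 1 by ring, enumerate_shift, List.filter_map, List.map_map]
  by_cases hs : sc = 0
  · simp [hs, Function.comp_def]
  · simp [hs, Function.comp_def]

lemma pvBad_nonneg (tl sl : List Int) : ∀ i ∈ pvBad tl sl, 0 ≤ i := by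
  intro i hi
  unfold pvBad at hi
  obtain ⟨p, hp, rfl⟩ := List.mem_map.1 hi
  have hp' := List.mem_of_mem_filter hp
  obtain ⟨k, hk, rfl⟩ := (PySem.List.mem_enumerate_iff _ _ _).1 hp'
  simp

lemma pvKeep_nil (Q : Int → Bool) (s : Int) : pvKeep Q s [] = [] := by
  simp [pvKeep, PySem.List.enumerate_nil]

lemma pvKeep_false (s : Int) (xs : List Int) : pvKeep (fun _ => false) s xs = xs := by
  simp [pvKeep, PySem.List.map_snd_enumerate]

lemma pvKeep_cons (Q : Int → Bool) (s : Int) (x : Int) (xs : List Int) :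
    pvKeep Q s (x :: xs) = (if Q s then [] else [x]) ++ pvKeep Q (s + 1) xs := by
  rw [pvKeep, PySem.List.enumerate_cons, List.filter_cons]
  by_cases h : Q s
  · simp [h, pvKeep]
  · simp [h, pvKeep]

lemma pvKeep_shift (Q : Int → Bool) (s : Int) (xs : List Int) :
    pvKeep Q (s + 1) xs = pvKeep (fun i => Q (i + 1)) s xs := by
  rw [pvKeep, enumerate_shift, List.filter_map, List.map_map, pvKeep]
  rfl

lemma pvKeep_congr (Q Q' : Int → Bool) (xs : List Int)
    (h : ∀ i, 0 ≤ i → Q i = Q' i) : pvKeep Q 0 xs = pvKeep Q' 0 xs := by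
  unfold pvKeep
  congr 1
  refine List.filter_congr ?_
  intro p hp
  obtain ⟨k, hk, rfl⟩ := (PySem.List.mem_enumerate_iff _ _ _).1 hp
  have := h ((0 : Int) + k) (by omega)
  simpa using this

-- the port's filter predicate, in terms of plain list membership in pvBad
lemma contains_ofList_eq (l : List Int) (x : Int) :
    PySem.Set.contains (PySem.Set.ofList l) x = decide (x ∈ l) := by
  by_cases h : x ∈ l
  · simp [h, PySem.Set.mem_ofList]
  · simp only [h, decide_false]
    rw [← Bool.not_eq_true]
    intro hc
    exact h ((PySem.Set.mem_ofList _ _).1 ((PySem.Set.contains_iff _ _).1 hc))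

lemma B_as_keep (tl sl : List Int) :
    remove_invalid_alt tl sl
      = (pvKeep (fun i => decide (i ∈ pvBad tl sl)) 0 tl,
         pvKeep (fun i => decide (i ∈ pvBad tl sl)) 0 sl) := by
  simp only [remove_invalid_alt, pvKeep, pvBad, contains_ofList_eq]
  rfl

lemma B_eq_spec : ∀ (tl sl : List Int), tl.length ≤ sl.length →
    remove_invalid_alt tl sl = pvSpec tl sl := by
  intro tl
  induction tl with
  | nil =>
      intro sl _
      rw [B_as_keep]
      have hQ : (fun i : Int => decide (i ∈ pvBad ([] : List Int) sl)) = (fun _ => false) := by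
        funext i
        simp [pvBad_nil]
      rw [hQ, pvKeep_nil, pvKeep_false]
      rfl
  | cons t tl ih =>
      intro sl hlen
      cases sl with
      | nil => simp at hlen
      | cons sc sl =>
          have ih' := ih sl (by simpa using hlen)
          rw [B_as_keep] at ih' ⊢
          have hshift : ∀ xs : List Int,
              pvKeep (fun i => decide (i ∈ pvBad (t :: tl) (sc :: sl))) (0 + 1) xs
              = pvKeep (fun i => decide (i ∈ pvBad tl sl)) 0 xs := by
            intro xs
            rw [pvKeep_shift]
            refine pvKeep_congr _ _ xs ?_
            intro i hi
            have hiff : (i + 1 ∈ pvBad (t :: tl) (sc :: sl)) ↔ i ∈ pvBad tl sl := by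
              rw [pvBad_cons]
              simp only [List.mem_append, List.mem_map]
              constructor
              · rintro (h0 | ⟨j, hj, hji⟩)
                · exfalso
                  split at h0 <;> simp at h0
                  omega
                · have hji' : j = i := by omega
                  exact hji' ▸ hj
              · intro h
                exact Or.inr ⟨i, h, rfl⟩
            simp [hiff]
          have hzero : decide ((0 : Int) ∈ pvBad (t :: tl) (sc :: sl)) = decide (sc = 0) := by
            rw [pvBad_cons]
            by_cases hs : sc = 0
            · simp [hs]
            · simp only [hs, decide_false]
              rw [decide_eq_false_iff_not]
              intro h0
              obtain ⟨j, hj, hj0⟩ := List.mem_map.1 h0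
              have := pvBad_nonneg tl sl j hj
              omega
          rw [pvKeep_cons, pvKeep_cons, hzero, hshift tl, hshift sl]
          simp only [pvSpec]
          by_cases hs : sc = 0
          · rw [if_pos hs, ← ih']
            simp [hs]
          · rw [if_neg hs, ← ih']
            simp [hs]

-- ===== VERDICT (by name: the statement is the Claim_ definition above) =====
theorem remove_invalid_spec : Claim_equal_remove_invalid := by
  intro tl sl _ hpre
  unfold Spec_remove_invalid
  rw [A_eq_spec tl sl hpre, B_eq_spec tl sl hpre]
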